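-- pv_equiv track=rewrite | github.com/JakubKalina/NIDUC | Image.py | add_control_sum_LuhnAlgorithm
-- ===== SOURCE A (Python) =====
-- def add_control_sum_LuhnAlgorithm(frame):
--     control_sum = 0
--     for k in range(0, len(frame)):
--         helper = frame[k]
--         while helper > 0:
--             control_sum += helper % 10
--             helper = int(helper / 10)
--     control_sum = control_sum % 10
--     control_sum = 10 - control_sum
--     frame.append(control_sum)
--     return frame
-- ===== SOURCE B (Python) =====
-- def add_control_sum_LuhnAlgorithm(frame):
--     # Carry-counting identity: for x > 0, digitsum(x) = x - 9 * sum(x // 10**k for k >= 1).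
--     # So instead of peeling digits with %10, add each positive element itself and
--     # subtract 9 for every "carry" (each truncated quotient by a growing power of ten).
--     total = 0
--     for x in frame:
--         if x > 0:
--             total += x
--             p = 10
--             while p <= x:
--                 total -= 9 * (x // p)
--                 p *= 10
--     frame.append(10 - total % 10)
--     return frame
-- ===== Notes on version B (the rewrite author's own statement) =====
-- stated objective: alternative
-- what changed: B never extracts digits: it uses the carry-counting identity digitsum(x) = x - 9*sum(x//10**k, k>=1), adding each positive element itself and subtracting 9 times each truncated quotient with an inner loop that multiplies a power of ten upward, instead of A's %10/div-by-10 digit-peeling loop.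
import Mathlib
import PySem

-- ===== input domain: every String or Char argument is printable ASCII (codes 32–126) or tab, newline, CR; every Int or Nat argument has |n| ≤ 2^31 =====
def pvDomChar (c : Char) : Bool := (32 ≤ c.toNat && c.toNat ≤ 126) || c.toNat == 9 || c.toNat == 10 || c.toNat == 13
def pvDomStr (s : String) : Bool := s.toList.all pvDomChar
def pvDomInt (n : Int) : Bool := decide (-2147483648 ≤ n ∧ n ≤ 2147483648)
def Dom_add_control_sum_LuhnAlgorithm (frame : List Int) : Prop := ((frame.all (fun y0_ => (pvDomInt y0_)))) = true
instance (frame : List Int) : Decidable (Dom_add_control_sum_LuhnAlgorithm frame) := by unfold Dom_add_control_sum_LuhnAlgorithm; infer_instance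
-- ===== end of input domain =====

-- B replaces A's %10/div-by-10 digit-peeling loop by the carry-counting identity
-- digitsum(x) = x - 9*Σ_{k≥1} x//10^k: it adds each positive element itself and
-- subtracts 9 times each truncated quotient, the inner loop multiplying a power of
-- ten upward (alternative algorithm, same cost). Both Pythons mutate `frame`
-- identically (one append); the theorem is about the returned list.

-- ===== PORT A =====
-- `int(helper / 10)` is truncating division; exact for |helper| ≤ 2^31 (PySem.Int.truncdiv)
def luhnWhile (helper control_sum : Int) : Int :=
  if helper > 0 then
    luhnWhile (PySem.Int.truncdiv helper 10) (control_sum + PySem.Int.mod helper 10)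
  else control_sum
termination_by helper.toNat
decreasing_by
  simp only [PySem.Int.truncdiv]
  rename_i h
  have h10 : helper.tdiv 10 = helper / 10 := Int.tdiv_eq_ediv_of_nonneg (by omega)
  omega

def add_control_sum_LuhnAlgorithm (frame : List Int) : List Int :=
  let control_sum :=
    (PySem.List.pyRange 0 (PySem.List.len frame) 1).foldl
      (fun control_sum k => luhnWhile (PySem.List.pyGetD frame k 0) control_sum) 0
  let control_sum := PySem.Int.mod control_sum 10
  let control_sum := 10 - control_sum
  frame ++ [control_sum]

-- ===== PORT B =====
-- `while p <= x: total -= 9 * (x // p); p *= 10`; the extra `1 ≤ p` conjunct only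
-- makes the recursion total (p is always a positive power of ten at the call site).
def powLoop (x p total : Int) : Int :=
  if h : 1 ≤ p ∧ p ≤ x then
    powLoop x (p * 10) (total - 9 * PySem.Int.floordiv x p)
  else total
termination_by (x + 1 - p).toNat
decreasing_by omega

def add_control_sum_LuhnAlgorithm_alt (frame : List Int) : List Int :=
  let total := frame.foldl
    (fun total x => if x > 0 then powLoop x 10 (total + x) else total) 0
  frame ++ [10 - PySem.Int.mod total 10]

-- ===== PRECONDITION & SPEC =====
def Spec_add_control_sum_LuhnAlgorithm (frame : List Int) (out : List Int) : Prop := out = add_control_sum_LuhnAlgorithm_alt frame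
instance (frame : List Int) (out : List Int) : Decidable (Spec_add_control_sum_LuhnAlgorithm frame out) := by unfold Spec_add_control_sum_LuhnAlgorithm; infer_instance

-- ===== CLAIM (what is proved, stated in full; the proofs are below) =====
def Claim_equal_add_control_sum_LuhnAlgorithm : Prop := ∀ (frame : List Int), Dom_add_control_sum_LuhnAlgorithm frame → Spec_add_control_sum_LuhnAlgorithm frame (add_control_sum_LuhnAlgorithm frame)

-- ===== LEMMAS AND PROOFS =====

-- Σ_{k≥0} m/10^k while ≥ 1, the value both loops' tails are measured against
def carryAux (m : Int) : Int :=
  if 1 ≤ m then m + carryAux (m / 10) else 0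
termination_by m.toNat
decreasing_by omega

theorem powLoop_eq (x p t : Int) (hp : 1 ≤ p) (hx : 0 ≤ x) :
    powLoop x p t = t - 9 * carryAux (x / p) := by
  rw [powLoop]
  by_cases hle : p ≤ x
  · rw [dif_pos ⟨hp, hle⟩, powLoop_eq x (p * 10) _ (by omega) hx]
    have hdd : x / p / 10 = x / (p * 10) := Int.ediv_ediv_of_nonneg (by omega)
    have h1 : 1 ≤ x / p := by
      rw [Int.le_ediv_iff_mul_le (by omega)]; omega
    conv_rhs => rw [carryAux, if_pos h1, hdd]
    rw [PySem.Int.floordiv_eq_ediv_of_pos (by omega : (0:Int) < p)]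
    ring
  · rw [dif_neg (by omega)]
    have h0 : x / p = 0 := Int.ediv_eq_zero_of_lt hx (by omega)
    rw [h0, carryAux]
    norm_num
termination_by (x + 1 - p).toNat
decreasing_by omega

theorem luhnWhile_eq (x t : Int) (hx : 0 ≤ x) :
    luhnWhile x t = t + x - 9 * carryAux (x / 10) := by
  rw [luhnWhile]
  by_cases hp : x > 0
  · have htd : PySem.Int.truncdiv x 10 = x / 10 := by
      simp only [PySem.Int.truncdiv]
      exact Int.tdiv_eq_ediv_of_nonneg (by omega)
    have hmd : PySem.Int.mod x 10 = x % 10 :=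
      PySem.Int.mod_eq_emod_of_pos (by norm_num)
    rw [if_pos hp, htd, hmd,
      luhnWhile_eq (x / 10) _ (by omega)]
    conv_rhs => rw [carryAux]
    by_cases h1 : 1 ≤ x / 10
    · rw [if_pos h1]
      generalize carryAux (x / 10 / 10) = c
      omega
    · rw [if_neg h1]
      have h0 : x / 10 = 0 := by omega
      rw [h0]
      have hc0 : carryAux (0 / 10) = 0 := by norm_num; rw [carryAux]; norm_num
      rw [hc0]
      omega
  · rw [if_neg hp]
    have hx0 : x = 0 := by omega
    subst hx0
    have hc0 : carryAux 0 = 0 := by rw [carryAux]; norm_num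
    simp [hc0]
termination_by x.toNat
decreasing_by omega

theorem step_eq (t x : Int) :
    luhnWhile x t = if x > 0 then powLoop x 10 (t + x) else t := by
  by_cases hp : x > 0
  · rw [if_pos hp, powLoop_eq x 10 (t + x) (by norm_num) (by omega),
      luhnWhile_eq x t (by omega)]
  · rw [if_neg hp, luhnWhile, if_neg hp]

-- ===== VERDICT (by name: the statement is the Claim_ definition above) =====
theorem add_control_sum_LuhnAlgorithm_spec : Claim_equal_add_control_sum_LuhnAlgorithm := by
  intro frame _
  show _ = _
  unfold add_control_sum_LuhnAlgorithm add_control_sum_LuhnAlgorithm_alt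
  simp only [PySem.List.len_eq]
  rw [PySem.List.foldl_pyRange_zero_pyGetD' frame 0
      (fun control_sum k => luhnWhile k control_sum) 0]
  have : (fun control_sum x => luhnWhile x control_sum)
       = (fun total x => if x > 0 then powLoop x 10 (total + x) else total) := by
    funext t x; exact step_eq t x
  rw [this]
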